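-- pv_equiv track=rewrite | github.com/isacko27/TOOLS | curso python/PYTHON ISAAC/soluciones/Tarea4_Aarón_Salas.py | obtener_digitos_for
-- ===== SOURCE A (Python) =====
-- def obtener_digitos_for (tupla):
--     if isinstance (tupla, tuple) == False:              #RESTRICCIONES
--         return "ERROR: INGRESE UNA TUPLA"
--     digitos = ""
--     for string in tupla:                                #ANALIZAR CADA ELEMENTO DE LA TUPLA
--         if isinstance (string, str) == False:           #RESTRICCIONES
--             return "ERROR: LOS ELEMENTOS DE LA TUPLA DEBEN SER TIPO STRING"
--         for numero in string:                           #ANALIZAR CADA ELEMENTO DEL STRING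
--             if numero in "0123456789":                  #VERIFICAR SI ES UN NÚMERO
--                 if numero not in digitos:
--                     digitos = digitos + numero          #AGREGAR EL NÚMERO AL RESULTADO
--     return digitos
-- ===== SOURCE B (Python) =====
-- def obtener_digitos_for(tupla):
--     if isinstance(tupla, tuple) == False:
--         return "ERROR: INGRESE UNA TUPLA"
--     for string in tupla:
--         if isinstance(string, str) == False:
--             return "ERROR: LOS ELEMENTOS DE LA TUPLA DEBEN SER TIPO STRING"
--     text = "".join(tupla)
--     present = [d for d in "0123456789" if d in text]
--     return "".join(sorted(present, key=text.index))
-- ===== Notes on version B (the rewrite author's own statement) =====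
-- stated objective: alternative
-- what changed: B never deduplicates a scan: it iterates over the ten digit characters '0'..'9', keeps those occurring in the concatenated text, and sorts them by first-occurrence index (text.index), instead of A's character-by-character scan with an inline 'not in result' dedup.
import Mathlib
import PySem

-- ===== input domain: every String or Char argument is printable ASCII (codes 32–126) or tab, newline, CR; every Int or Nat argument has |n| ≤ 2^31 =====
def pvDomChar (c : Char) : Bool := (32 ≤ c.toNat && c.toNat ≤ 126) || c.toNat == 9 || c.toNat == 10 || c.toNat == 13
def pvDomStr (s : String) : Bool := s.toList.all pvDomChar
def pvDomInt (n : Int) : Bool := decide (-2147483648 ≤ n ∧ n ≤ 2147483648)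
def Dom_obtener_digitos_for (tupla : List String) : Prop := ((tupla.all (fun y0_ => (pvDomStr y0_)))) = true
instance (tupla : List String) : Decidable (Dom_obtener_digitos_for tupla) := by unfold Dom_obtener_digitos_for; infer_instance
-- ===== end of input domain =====

-- B replaces A's scan-with-inline-dedup by a different algorithm: iterate over the ten digit
-- characters, keep those present in the concatenated text, sort them by first-occurrence index;
-- objective: alternative. The isinstance guards of the Python code are vacuous under the typed
-- signature (tupla : List String).

-- the literal "0123456789" both Pythons test membership in
def pvDigits : List Char := ['0','1','2','3','4','5','6','7','8','9']

-- ===== PORT A =====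
-- inner body: if numero in "0123456789": if numero not in digitos: digitos = digitos + numero
def obtenerStepA (acc : List Char) (c : Char) : List Char :=
  if pvDigits.contains c then (if acc.contains c then acc else acc ++ [c]) else acc

def obtener_digitos_for (tupla : List String) : String :=
  String.ofList (tupla.foldl (fun acc s => s.toList.foldl obtenerStepA acc) [])

-- ===== PORT B =====
-- text = "".join(tupla); present = [d for d in "0123456789" if d in text];
-- return "".join(sorted(present, key=text.index))  (text.index d = Chars.find, guarded by membership)
def obtener_digitos_for_alt (tupla : List String) : String :=
  String.ofList (PySem.List.sorted
    (pvDigits.filter (fun d => PySem.Chars.isIn [d] ((tupla.map String.toList).flatten)))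
    (fun d => PySem.Chars.find ((tupla.map String.toList).flatten) [d]) false)

-- ===== PRECONDITION & SPEC =====
def Spec_obtener_digitos_for (tupla : List String) (out : String) : Prop := out = obtener_digitos_for_alt tupla
instance (tupla : List String) (out : String) : Decidable (Spec_obtener_digitos_for tupla out) := by unfold Spec_obtener_digitos_for; infer_instance

-- ===== CLAIM (what is proved, stated in full; the proofs are below) =====
def Claim_equal_obtener_digitos_for : Prop := ∀ (tupla : List String), Dom_obtener_digitos_for tupla → Spec_obtener_digitos_for tupla (obtener_digitos_for tupla)

-- ===== LEMMAS AND PROOFS =====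

-- A's accumulator after the whole scan of a character list
def pvD (T : List Char) : List Char := T.foldl obtenerStepA []

-- first-occurrence index (meaningful only when a ∈ T)
def pvIdx (T : List Char) (a : Char) : Nat := (PySem.List.index? T a).getD 0

-- A's per-string loops = one fold over the concatenation
theorem pv_fold_flatten (l : List String) (acc : List Char) :
    l.foldl (fun acc s => s.toList.foldl obtenerStepA acc) acc
      = ((l.map String.toList).flatten).foldl obtenerStepA acc := by
  induction l generalizing acc with
  | nil => rfl
  | cons s t ih => simp [List.foldl, ih, List.foldl_append]

-- A's dedup-on-insert fold = dedup fold (PySem.Set.add) over the filtered characters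
theorem pv_inner_eq (l : List Char) (acc : List Char) :
    l.foldl obtenerStepA acc
      = (l.filter (fun c => pvDigits.contains c)).foldl PySem.Set.add acc := by
  induction l generalizing acc with
  | nil => rfl
  | cons c l ih =>
      by_cases h : c ∈ pvDigits
      · simp [List.foldl, obtenerStepA, h, List.filter, PySem.Set.add, ih]
      · simp [List.foldl, obtenerStepA, h, List.filter, ih]

theorem pvD_eq_ofList (T : List Char) :
    pvD T = PySem.Set.ofList (T.filter (fun c => pvDigits.contains c)) := by
  rw [pvD, pv_inner_eq, PySem.Set.ofList_eq_foldl]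

theorem mem_pvD (T : List Char) (a : Char) : a ∈ pvD T ↔ a ∈ pvDigits ∧ a ∈ T := by
  rw [pvD_eq_ofList]
  simp [PySem.Set.mem_ofList, List.mem_filter, and_comm]

theorem nodup_pvD (T : List Char) : (pvD T).Nodup := by
  rw [pvD_eq_ofList]; exact PySem.Set.nodup_ofList _

theorem pv_singleton_infix (a : Char) (T : List Char) : [a] <:+: T ↔ a ∈ T := by
  constructor
  · intro h; exact h.subset (by simp)
  · intro h
    obtain ⟨s, t, rfl⟩ := List.append_of_mem h
    exact ⟨s, t, by simp⟩

-- the first-occurrence index of a present element is an index into T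
theorem pvIdx_lt_length (T : List Char) (a : Char) (h : a ∈ T) : pvIdx T a < T.length := by
  have hs : (PySem.List.index? T a).isSome := (PySem.List.index?_isSome_iff T a).mpr h
  obtain ⟨k, hk⟩ := Option.isSome_iff_exists.mp hs
  obtain ⟨pre, suf, hT, hlen, -⟩ := (PySem.List.index?_eq_some_iff T a k).mp hk
  rw [pvIdx, hk, Option.getD_some]
  rw [hT, List.length_append, List.length_cons]
  omega

theorem pvIdx_append_of_mem (T s : List Char) (a : Char) (h : a ∈ T) :
    pvIdx (T ++ s) a = pvIdx T a := by
  rw [pvIdx, pvIdx, PySem.List.index?_append_of_mem s h]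

theorem pvIdx_append_fresh (T : List Char) (c : Char) (h : c ∉ T) :
    pvIdx (T ++ [c]) c = T.length := by
  rw [pvIdx, PySem.List.index?_append_singleton_self T c h, Option.getD_some]

-- A's output is listed in strictly increasing order of first occurrence
theorem pairwise_pvD (T : List Char) :
    (pvD T).Pairwise (fun a b => pvIdx T a < pvIdx T b) := by
  induction T using List.reverseRecOn with
  | nil => simp [pvD]
  | append_singleton T c ih =>
      have hstep : pvD (T ++ [c]) = obtenerStepA (pvD T) c := by
        simp [pvD, List.foldl_append]
      have hmemT : ∀ a ∈ pvD T, a ∈ T := fun a ha => ((mem_pvD T a).mp ha).2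
      have hkeep : (pvD T).Pairwise (fun a b => pvIdx (T ++ [c]) a < pvIdx (T ++ [c]) b) := by
        refine List.Pairwise.imp_of_mem ?_ ih
        intro a b ha hb hab
        rw [pvIdx_append_of_mem T [c] a (hmemT a ha), pvIdx_append_of_mem T [c] b (hmemT b hb)]
        exact hab
      rw [hstep, obtenerStepA]
      by_cases hd : c ∈ pvDigits
      · by_cases hc : c ∈ pvD T
        · simp [hd, hc, hkeep]
        · simp only [hd, hc, List.contains_eq_mem, decide_true, decide_false, if_true, if_false,
            Bool.false_eq_true]
          have hcT : c ∉ T := fun hcT => hc ((mem_pvD T c).mpr ⟨hd, hcT⟩)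
          refine List.pairwise_append.mpr ⟨hkeep, by simp, ?_⟩
          intro a ha b hb
          simp only [List.mem_singleton] at hb
          rw [hb]
          rw [pvIdx_append_of_mem T [c] a (hmemT a ha), pvIdx_append_fresh T c hcT]
          exact pvIdx_lt_length T a (hmemT a ha)
      · simp [hd, hkeep]

-- text.index of a present character = the first-occurrence index
theorem pv_find_eq_idx (T : List Char) (a : Char) (h : a ∈ T) :
    PySem.Chars.find T [a] = (pvIdx T a : Int) := by
  have hinf : [a] <:+: T := (pv_singleton_infix a T).mpr h
  have h0 : 0 ≤ PySem.Chars.find T [a] := (PySem.Chars.find_nonneg_iff T [a]).mpr hinf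
  obtain ⟨hpre, hmin⟩ := PySem.Chars.find_spec h0
  set m := (PySem.Chars.find T [a]).toNat with hm
  -- T[m] = a
  have hgm : T[m]? = some a := by
    obtain ⟨t, ht⟩ := hpre
    rw [← List.head?_drop, ← ht]; rfl
  -- the index? witness
  have hs : (PySem.List.index? T a).isSome := (PySem.List.index?_isSome_iff T a).mpr h
  obtain ⟨k, hk⟩ := Option.isSome_iff_exists.mp hs
  obtain ⟨pre, suf, hT, hlen, hnpre⟩ := (PySem.List.index?_eq_some_iff T a k).mp hk
  have hidx : pvIdx T a = k := by rw [pvIdx, hk, Option.getD_some]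
  have hmk : m = k := by
    rcases Nat.lt_trichotomy m k with hlt | heq | hgt
    · -- m < k = pre.length: T[m] ∈ pre, so a ∈ pre, contradicting a ∉ pre
      exfalso
      have hmp : m < pre.length := by omega
      have hp : T[m]? = pre[m]? := by
        rw [hT]; exact List.getElem?_append_left hmp
      rw [hp, List.getElem?_eq_getElem hmp] at hgm
      have : pre[m] = a := by simpa using hgm
      exact hnpre (this ▸ List.getElem_mem hmp)
    · exact heq
    · -- k < m: but [a] <+: T.drop k, contradicting minimality
      exfalso
      refine hmin k hgt ?_
      have hdk : T.drop k = a :: suf := by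
        rw [hT, List.drop_left' hlen]
      exact ⟨suf, by simp [hdk]⟩
  rw [hidx, ← hmk, hm, Int.toNat_of_nonneg h0]

-- A's output is a rearrangement of B's pre-sort digit list
theorem pv_perm (T : List Char) :
    (pvD T).Perm (pvDigits.filter (fun d => PySem.Chars.isIn [d] T)) := by
  have hnd : (pvDigits.filter (fun d => PySem.Chars.isIn [d] T)).Nodup :=
    (by decide : pvDigits.Nodup).filter _
  refine (List.perm_ext_iff_of_nodup (nodup_pvD T) hnd).mpr ?_
  intro a
  rw [mem_pvD, List.mem_filter]
  constructor
  · rintro ⟨h1, h2⟩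
    exact ⟨h1, by rw [PySem.Chars.isIn_iff_infix]; exact (pv_singleton_infix a T).mpr h2⟩
  · rintro ⟨h1, h2⟩
    exact ⟨h1, (pv_singleton_infix a T).mp ((PySem.Chars.isIn_iff_infix [a] T).mp h2)⟩

-- ===== VERDICT (by name: the statement is the Claim_ definition above) =====
theorem obtener_digitos_for_spec : Claim_equal_obtener_digitos_for := by
  intro tupla _
  unfold Spec_obtener_digitos_for obtener_digitos_for obtener_digitos_for_alt
  rw [pv_fold_flatten]
  set T := (tupla.map String.toList).flatten with hT
  have hpair : (pvD T).Pairwise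
      (fun a b => PySem.Chars.find T [a] < PySem.Chars.find T [b]) := by
    refine List.Pairwise.imp_of_mem ?_ (pairwise_pvD T)
    intro a b ha hb hab
    rw [pv_find_eq_idx T a ((mem_pvD T a).mp ha).2, pv_find_eq_idx T b ((mem_pvD T b).mp hb).2]
    exact_mod_cast hab
  rw [PySem.List.sorted_eq_of_perm_of_pairwise_lt
    (pvDigits.filter (fun d => PySem.Chars.isIn [d] T)) (pvD T)
    (fun d => PySem.Chars.find T [d]) (pv_perm T) hpair]
  rfl
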